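-- pv_equiv track=rewrite | github.com/cmplx-xyttmt/competitive-programming | python/src/advent_of_code/2022/day15/day15.py | cant_row
-- ===== SOURCE A (Python) =====
-- from collections import deque
--
-- def cant_row(distance, sensor, row):
--     q = deque()
--     q.append((sensor, 0))
--     coords = set()
--     d = [(0, 1), (0, -1), (-1, 0), (1, 0)]
--     seen = set()
--     seen.add(sensor)
--     while q:
--         (r, c), dist = q.popleft()
--         if dist > distance:
--             break
--         if r == row:
--             coords.add(c)
--         for dr, dc in d:
--             nr, nc = r + dr, c + dc
--             if (nr, nc) not in seen:
--                 q.append(((nr, nc), dist + 1))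
--                 seen.add((nr, nc))
--
--     return coords
-- ===== SOURCE B (Python) =====
-- def cant_row(distance, sensor, row):
--     rem = distance - abs(sensor[0] - row)
--     cols = set()
--     if rem >= 0:
--         cols.add(sensor[1])
--         for k in range(1, rem + 1):
--             cols.add(sensor[1] + k)
--             cols.add(sensor[1] - k)
--     return cols
-- ===== Notes on version B (the rewrite author's own statement) =====
-- stated objective: faster
-- what changed: Replaces the breadth-first flood fill over the whole Manhattan ball (with a queue and a visited set) by the closed form rem = distance - |sensor_row - row|, emitting the columns sensor_col, sensor_col±1, ..., sensor_col±rem directly.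
import Mathlib
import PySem

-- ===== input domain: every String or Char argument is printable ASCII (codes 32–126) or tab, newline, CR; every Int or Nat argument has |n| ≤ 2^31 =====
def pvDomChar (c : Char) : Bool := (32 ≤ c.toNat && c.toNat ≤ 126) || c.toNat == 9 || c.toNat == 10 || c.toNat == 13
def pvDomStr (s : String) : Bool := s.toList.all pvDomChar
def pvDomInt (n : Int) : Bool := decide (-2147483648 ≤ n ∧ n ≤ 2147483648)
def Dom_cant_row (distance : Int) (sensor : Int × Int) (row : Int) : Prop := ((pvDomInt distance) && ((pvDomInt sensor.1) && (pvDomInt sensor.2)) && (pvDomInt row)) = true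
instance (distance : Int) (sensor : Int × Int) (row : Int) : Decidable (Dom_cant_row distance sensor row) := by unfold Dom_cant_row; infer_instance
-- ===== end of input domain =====

-- B replaces A's breadth-first flood fill of the Manhattan ball by the closed form
-- rem = distance - |sensor_row - row|, cols = sensor_col, sensor_col±1, …, sensor_col±rem (faster: O(distance) vs O(distance^2)).

-- ===== PORT A =====
-- the 'for dr, dc in d' loop body: threads (queue, seen) through the four directions
def cantRowDirFold (r c dist : Int) (st : List ((Int × Int) × Int) × PySem.Set (Int × Int)) :
    List ((Int × Int) × Int) × PySem.Set (Int × Int) :=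
  [((0 : Int), (1 : Int)), (0, -1), (-1, 0), (1, 0)].foldl
    (fun st dd =>
      let n : Int × Int := (r + dd.1, c + dd.2)
      if PySem.Set.contains st.2 n then st
      else (st.1 ++ [(n, dist + 1)], PySem.Set.add st.2 n)) st

-- the 'while q' loop; the fuel argument only makes the recursion structural (it is
-- chosen large enough that it never runs out: the BFS pops at most 2d²+2d+2 entries)
def cantRowLoop (distance row : Int) : Nat → List ((Int × Int) × Int) → PySem.Set Int → PySem.Set (Int × Int) → PySem.Set Int
  | 0, _, coords, _ => coords
  | _ + 1, [], coords, _ => coords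
  | fuel + 1, (rc, dist) :: q, coords, seen =>
    if dist > distance then coords
    else
      let coords' := if rc.1 = row then PySem.Set.add coords rc.2 else coords
      let st := cantRowDirFold rc.1 rc.2 dist (q, seen)
      cantRowLoop distance row fuel st.1 coords' st.2

def cant_row (distance : Int) (sensor : Int × Int) (row : Int) : List Int :=
  cantRowLoop distance row (2 * distance * distance + 2 * distance + 3).toNat
    [(sensor, 0)] PySem.Set.empty (PySem.Set.add PySem.Set.empty sensor)

-- ===== PORT B =====
def cant_row_alt (distance : Int) (sensor : Int × Int) (row : Int) : List Int :=
  let rem := distance - |sensor.1 - row|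
  let cols : PySem.Set Int := PySem.Set.empty
  if 0 ≤ rem then
    (PySem.List.pyRange 1 (rem + 1) 1).foldl
      (fun s k => PySem.Set.add (PySem.Set.add s (sensor.2 + k)) (sensor.2 - k))
      (PySem.Set.add cols sensor.2)
  else cols

-- ===== PRECONDITION & SPEC =====
def Spec_cant_row (distance : Int) (sensor : Int × Int) (row : Int) (out : List Int) : Prop := out = cant_row_alt distance sensor row
instance (distance : Int) (sensor : Int × Int) (row : Int) (out : List Int) : Decidable (Spec_cant_row distance sensor row out) := by unfold Spec_cant_row; infer_instance

-- ===== CLAIM (what is proved, stated in full; the proofs are below) =====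
def Claim_equal_cant_row : Prop := ∀ (distance : Int) (sensor : Int × Int) (row : Int), Dom_cant_row distance sensor row → Spec_cant_row distance sensor row (cant_row distance sensor row)

-- ===== LEMMAS AND PROOFS =====

-- Manhattan distance from the sensor
def relD (sr sc : Int) (p : Int × Int) : Int := ((p.1 - sr).natAbs : Int) + ((p.2 - sc).natAbs : Int)

-- the j-th pair of the east (ε = 1) / west (ε = -1) arm of the sphere of radius lv
def pairJ (sr sc ε lv j : Int) : List (Int × Int) :=
  [(sr - j, sc + ε * (lv - j)), (sr + j, sc + ε * (lv - j))]

-- arm pairs j = s, s+1, …, s+m-1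
def armSeg (sr sc ε lv s : Int) : Nat → List (Int × Int)
  | 0 => []
  | m + 1 => pairJ sr sc ε lv s ++ armSeg sr sc ε lv (s + 1) m

-- the cells of the sphere of radius lv (lv ≥ 1), in the order A's BFS discovers them
def lvlCells (sr sc lv : Int) : List (Int × Int) :=
  ((sr, sc + lv) :: armSeg sr sc 1 lv 1 (lv - 1).toNat)
  ++ ((sr, sc - lv) :: armSeg sr sc (-1) lv 1 (lv - 1).toNat)
  ++ [(sr - lv, sc), (sr + lv, sc)]

def lvlE (sr sc lv : Int) : List ((Int × Int) × Int) := (lvlCells sr sc lv).map (fun p => (p, lv))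

-- the not-yet-seen neighbours of (r,c), in direction order
def freshNbrs (seen : PySem.Set (Int × Int)) (r c : Int) : List (Int × Int) :=
  ([(r, c + 1), (r, c - 1), (r - 1, c), (r + 1, c)] : List (Int × Int)).filter
    (fun p => !(PySem.Set.contains seen p))

-- pure model of running the loop body over a whole queue segment (no break inside)
def scanQ (row : Int) : List ((Int × Int) × Int) → PySem.Set (Int × Int) → PySem.Set Int →
    List ((Int × Int) × Int) × PySem.Set (Int × Int) × PySem.Set Int
  | [], seen, coords => ([], seen, coords)
  | (rc, dist) :: Q, seen, coords =>
    let coords' := if rc.1 = row then PySem.Set.add coords rc.2 else coords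
    let fresh := freshNbrs seen rc.1 rc.2
    let rest := scanQ row Q (seen ++ fresh) coords'
    (fresh.map (fun p => (p, dist + 1)) ++ rest.1, rest.2.1, rest.2.2)

-- columns contributed at row `row` by the sphere of radius lv
def rowColsClosed (sr sc row lv : Int) : List Int :=
  if lv < ((sr - row).natAbs : Int) then []
  else if ((sr - row).natAbs : Int) = lv then [sc]
  else [sc + (lv - ((sr - row).natAbs : Int)), sc - (lv - ((sr - row).natAbs : Int))]

-- columns contributed by spheres lv, lv+1, …, lv+m-1
def colsFrom (sr sc row lv : Int) : Nat → List Int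
  | 0 => []
  | m + 1 => rowColsClosed sr sc row lv ++ colsFrom sr sc row (lv + 1) m

-- pairs sc±a, sc±(a+1), …, sc±(a+m-1)
def pairsSeg (sc a : Int) : Nat → List Int
  | 0 => []
  | m + 1 => [sc + a, sc - a] ++ pairsSeg sc (a + 1) m

-- common closed form both ports are reduced to
def midForm (sc rem : Int) : List Int :=
  if rem < 0 then [] else sc :: pairsSeg sc 1 rem.toNat

-- number of pops the loop performs for levels lv, …, lv+m-1 plus the breaking pop
def pops : Nat → Int → Nat
  | 0, _ => 1
  | m + 1, lv => (4 * lv).toNat + pops m (lv + 1)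

lemma mem_pairsSeg (sc a : Int) (m : Nat) (x : Int) :
    x ∈ pairsSeg sc a m ↔ ∃ j : Int, a ≤ j ∧ j < a + m ∧ (x = sc + j ∨ x = sc - j) := by
  induction m generalizing a with
  | zero => simp [pairsSeg]; omega
  | succ m ih =>
    simp [pairsSeg, ih]
    constructor
    · rintro (h | h | ⟨j, h1, h2, h3⟩)
      · exact ⟨a, by omega, by omega, Or.inl (by omega)⟩
      · exact ⟨a, by omega, by omega, Or.inr (by omega)⟩
      · exact ⟨j, by omega, by omega, h3⟩
    · rintro ⟨j, h1, h2, h3⟩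
      by_cases hj : j = a
      · subst hj; rcases h3 with h3 | h3 <;> simp [h3]
      · exact Or.inr (Or.inr ⟨j, by omega, by omega, h3⟩)

lemma pairsSeg_snoc (sc a : Int) (m : Nat) :
    pairsSeg sc a (m + 1) = pairsSeg sc a m ++ [sc + (a + m), sc - (a + m)] := by
  induction m generalizing a with
  | zero => simp [pairsSeg]
  | succ m ih =>
    have h : a + 1 + (m : Int) = a + ((m : Int) + 1) := by ring
    rw [pairsSeg, ih, h, pairsSeg]
    push_cast
    simp [List.append_assoc]

lemma mem_armSeg (sr sc ε lv s : Int) (m : Nat) (p : Int × Int) :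
    p ∈ armSeg sr sc ε lv s m ↔
      ∃ j : Int, s ≤ j ∧ j < s + m ∧
        (p = (sr - j, sc + ε * (lv - j)) ∨ p = (sr + j, sc + ε * (lv - j))) := by
  induction m generalizing s with
  | zero => simp [armSeg]; omega
  | succ m ih =>
    simp [armSeg, pairJ, ih]
    constructor
    · rintro (h | h | ⟨j, h1, h2, h3⟩)
      · exact ⟨s, by omega, by omega, Or.inl (by simp [h])⟩
      · exact ⟨s, by omega, by omega, Or.inr (by simp [h])⟩
      · exact ⟨j, by omega, by omega, h3⟩
    · rintro ⟨j, h1, h2, h3⟩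
      by_cases hj : j = s
      · subst hj; rcases h3 with h3 | h3 <;> simp [h3]
      · exact Or.inr (Or.inr ⟨j, by omega, by omega, h3⟩)

lemma armSeg_snoc (sr sc ε lv s : Int) (m : Nat) :
    armSeg sr sc ε lv s (m + 1) = armSeg sr sc ε lv s m ++ pairJ sr sc ε lv (s + m) := by
  induction m generalizing s with
  | zero => simp [armSeg]
  | succ m ih =>
    have h : s + 1 + (m : Int) = s + ((m : Int) + 1) := by ring
    rw [armSeg, ih, h, armSeg]
    push_cast
    simp [List.append_assoc]

lemma length_armSeg (sr sc ε lv s : Int) (m : Nat) :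
    (armSeg sr sc ε lv s m).length = 2 * m := by
  induction m generalizing s with
  | zero => simp [armSeg]
  | succ m ih => simp [armSeg, pairJ, ih]; omega

-- A's while-loop breaks on the first entry whose distance exceeds `distance`
lemma loop_break (distance row : Int) (fuel : Nat) (rc : Int × Int) (dist : Int)
    (q : List ((Int × Int) × Int)) (coords : PySem.Set Int) (seen : PySem.Set (Int × Int))
    (h : dist > distance) :
    cantRowLoop distance row (fuel + 1) ((rc, dist) :: q) coords seen = coords := by
  simp [cantRowLoop, h]

lemma dirFold_eq (r c dist : Int) (q : List ((Int × Int) × Int)) (seen : PySem.Set (Int × Int)) :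
    cantRowDirFold r c dist (q, seen) =
      (q ++ (freshNbrs seen r c).map (fun p => (p, dist + 1)), seen ++ freshNbrs seen r c) := by
  have d21 : ((r, c + -1) : Int × Int) ≠ (r, c + 1) := by
    simp only [ne_eq, Prod.mk.injEq, not_and]; intros; omega
  have d31 : ((r + -1, c) : Int × Int) ≠ (r, c + 1) := by
    simp only [ne_eq, Prod.mk.injEq, not_and]; intros; omega
  have d32 : ((r + -1, c) : Int × Int) ≠ (r, c + -1) := by
    simp only [ne_eq, Prod.mk.injEq, not_and]; intros; omega
  have d41 : ((r + 1, c) : Int × Int) ≠ (r, c + 1) := by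
    simp only [ne_eq, Prod.mk.injEq, not_and]; intros; omega
  have d42 : ((r + 1, c) : Int × Int) ≠ (r, c + -1) := by
    simp only [ne_eq, Prod.mk.injEq, not_and]; intros; omega
  have d43 : ((r + 1, c) : Int × Int) ≠ (r + -1, c) := by
    simp only [ne_eq, Prod.mk.injEq, not_and]; intros; omega
  by_cases h1 : ((r, c + 1) : Int × Int) ∈ seen <;>
    by_cases h2 : ((r, c + -1) : Int × Int) ∈ seen <;>
      by_cases h3 : ((r + -1, c) : Int × Int) ∈ seen <;>
        by_cases h4 : ((r + 1, c) : Int × Int) ∈ seen <;>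
          simp [cantRowDirFold, freshNbrs, List.filter_cons, PySem.Set.add_eq_ite,
            sub_eq_add_neg, h1, h2, h3, h4, d21, d31, d32, d41, d42, d43, List.mem_append]

-- running the loop over a queue segment whose entries all have distance ≤ `distance`
lemma loop_run (distance row : Int) :
    ∀ (Q R : List ((Int × Int) × Int)) (coords : PySem.Set Int) (seen : PySem.Set (Int × Int)) (fuel : Nat),
      (∀ e ∈ Q, e.2 ≤ distance) →
      cantRowLoop distance row (Q.length + fuel) (Q ++ R) coords seen =
        cantRowLoop distance row fuel (R ++ (scanQ row Q seen coords).1)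
          (scanQ row Q seen coords).2.2 (scanQ row Q seen coords).2.1 := by
  intro Q
  induction Q with
  | nil => intro R coords seen fuel _; simp [scanQ]
  | cons e Q ih =>
    intro R coords seen fuel h
    obtain ⟨rc, dist⟩ := e
    have hd : ¬ dist > distance := by
      have := h (rc, dist) (List.mem_cons_self ..)
      simpa using this
    have hlen : (((rc, dist) :: Q).length + fuel) = (Q.length + fuel) + 1 := by
      simp; omega
    rw [hlen, List.cons_append, cantRowLoop, if_neg hd, dirFold_eq]
    have htail : ∀ e ∈ Q, e.2 ≤ distance := fun e he => h e (List.mem_cons_of_mem _ he)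
    simp only [List.append_assoc]
    rw [ih (R ++ (freshNbrs seen rc.1 rc.2).map (fun p => (p, dist + 1))) _ _ fuel htail]
    simp [scanQ, List.append_assoc]

-- the coords component of a scan only depends on the row-matching cells of the queue
lemma scanQ_coords (row : Int) :
    ∀ (Q : List ((Int × Int) × Int)) (seen : PySem.Set (Int × Int)) (coords : PySem.Set Int),
      (scanQ row Q seen coords).2.2 =
        (((Q.map Prod.fst).filter (fun p => decide (p.1 = row))).map Prod.snd).foldl PySem.Set.add coords := by
  intro Q
  induction Q with
  | nil => intro seen coords; simp [scanQ]
  | cons e Q ih =>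
    intro seen coords
    obtain ⟨rc, dist⟩ := e
    by_cases hr : rc.1 = row <;> simp [scanQ, hr, ih]

lemma scanQ_append (row : Int) (Q1 Q2 : List ((Int × Int) × Int)) (seen : PySem.Set (Int × Int)) (coords : PySem.Set Int) :
    scanQ row (Q1 ++ Q2) seen coords =
      ((scanQ row Q1 seen coords).1 ++ (scanQ row Q2 (scanQ row Q1 seen coords).2.1 (scanQ row Q1 seen coords).2.2).1,
       (scanQ row Q2 (scanQ row Q1 seen coords).2.1 (scanQ row Q1 seen coords).2.2).2.1,
       (scanQ row Q2 (scanQ row Q1 seen coords).2.1 (scanQ row Q1 seen coords).2.2).2.2) := by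
  induction Q1 generalizing seen coords with
  | nil => simp [scanQ]
  | cons e Q1 ih =>
    obtain ⟨rc, dist⟩ := e
    simp [scanQ, ih, List.append_assoc]


lemma freshNbrs_eq (seen : PySem.Set (Int × Int)) (r c : Int) (b1 b2 b3 b4 : Bool)
    (h1 : (((r, c + 1) : Int × Int) ∈ seen) ↔ b1 = true)
    (h2 : (((r, c - 1) : Int × Int) ∈ seen) ↔ b2 = true)
    (h3 : (((r - 1, c) : Int × Int) ∈ seen) ↔ b3 = true)
    (h4 : (((r + 1, c) : Int × Int) ∈ seen) ↔ b4 = true) :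
    freshNbrs seen r c =
      (if b1 then [] else [(r, c + 1)]) ++ (if b2 then [] else [(r, c - 1)])
      ++ (if b3 then [] else [(r - 1, c)]) ++ (if b4 then [] else [(r + 1, c)]) := by
  cases b1 <;> cases b2 <;> cases b3 <;> cases b4 <;>
    simp_all [freshNbrs, List.filter_cons]

lemma scanQ_single (row r c d : Int) (seen : PySem.Set (Int × Int)) (coords : PySem.Set Int) :
    scanQ row [((r, c), d)] seen coords =
      ((freshNbrs seen r c).map (fun p => (p, d + 1)), seen ++ freshNbrs seen r c,
        if r = row then PySem.Set.add coords c else coords) := by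
  simp [scanQ]

lemma scanQ_cons (row r c d : Int) (Q : List ((Int × Int) × Int))
    (seen : PySem.Set (Int × Int)) (coords : PySem.Set Int) :
    scanQ row (((r, c), d) :: Q) seen coords =
      ((freshNbrs seen r c).map (fun p => (p, d + 1)) ++
          (scanQ row Q (seen ++ freshNbrs seen r c)
            (if r = row then PySem.Set.add coords c else coords)).1,
        (scanQ row Q (seen ++ freshNbrs seen r c)
            (if r = row then PySem.Set.add coords c else coords)).2.1,
        (scanQ row Q (seen ++ freshNbrs seen r c)
            (if r = row then PySem.Set.add coords c else coords)).2.2) := rfl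

lemma inSeenIff {seen : PySem.Set (Int × Int)} {P : Int × Int → Prop}
    (hseen : ∀ p, p ∈ seen ↔ P p) (p : Int × Int) (b : Bool) (h : P p ↔ b = true) :
    (p ∈ seen) ↔ b = true := (hseen p).trans h

-- scanning one arm of a level: discovers the matching arm of the next level, shifted by one pair
set_option maxHeartbeats 1000000 in
lemma scanArm (sr sc row lv : Int) (ε : Int) (hε : ε = 1 ∨ ε = -1)
    (Extra : Int × Int → Prop)
    (hex : ∀ p, Extra p → ε * (p.2 - sc) ≤ -1) :
    ∀ (m : Nat) (s : Int) (seen : PySem.Set (Int × Int)) (coords : PySem.Set Int),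
      1 ≤ s → s + m = lv →
      (∀ p, p ∈ seen ↔ (relD sr sc p ≤ lv ∨ Extra p ∨ p = (sr, sc + ε * (lv + 1)) ∨
        p ∈ armSeg sr sc ε (lv + 1) 1 s.toNat)) →
      (scanQ row ((armSeg sr sc ε lv s m).map (fun p => (p, lv))) seen coords).1
          = (armSeg sr sc ε (lv + 1) (s + 1) m).map (fun p => (p, lv + 1)) ∧
      (∀ p, p ∈ (scanQ row ((armSeg sr sc ε lv s m).map (fun p => (p, lv))) seen coords).2.1 ↔
          (relD sr sc p ≤ lv ∨ Extra p ∨ p = (sr, sc + ε * (lv + 1)) ∨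
            p ∈ armSeg sr sc ε (lv + 1) 1 (s + m).toNat)) := by
  intro m
  induction m with
  | zero =>
    intro s seen coords hs hm hseen
    constructor
    · simp [armSeg, scanQ]
    · intro p
      simpa [armSeg, scanQ] using hseen p
  | succ m ih =>
    intro s seen coords hs hm hseen
    have hm' : s + (m : Int) + 1 = lv := by push_cast at hm ⊢; omega
    have hslv : s ≤ lv - 1 := by omega
    -- the two cells of pair s
    have hA1 : (((sr - s, sc + ε * (lv - s) + 1) : Int × Int) ∈ seen) ↔ (true = true) := by
      refine inSeenIff hseen _ _ (iff_of_true ?_ rfl)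
      rcases hε with rfl | rfl
      · refine Or.inr (Or.inr (Or.inr ((mem_armSeg _ _ _ _ _ _ _).mpr
          ⟨s, by omega, by omega, Or.inl ?_⟩)))
        rw [Prod.mk.injEq]
        constructor <;> omega
      · exact Or.inl (by simp only [relD]; omega)
    have hA2 : (((sr - s, sc + ε * (lv - s) - 1) : Int × Int) ∈ seen) ↔ (true = true) := by
      refine inSeenIff hseen _ _ (iff_of_true ?_ rfl)
      rcases hε with rfl | rfl
      · exact Or.inl (by simp only [relD]; omega)
      · refine Or.inr (Or.inr (Or.inr ((mem_armSeg _ _ _ _ _ _ _).mpr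
          ⟨s, by omega, by omega, Or.inl ?_⟩)))
        rw [Prod.mk.injEq]
        constructor <;> omega
    have hA3 : (((sr - s - 1, sc + ε * (lv - s)) : Int × Int) ∈ seen) ↔ (false = true) := by
      refine inSeenIff hseen _ _ (iff_of_false ?_ (by simp))
      rintro (h | h | h | h)
      · simp only [relD] at h
        rcases hε with rfl | rfl <;> omega
      · rcases hε with rfl | rfl <;> (have := hex _ h; simp at this; omega)
      · have := congrArg Prod.fst h
        simp at this
        omega
      · rw [mem_armSeg] at h
        rcases h with ⟨j, hj1, hj2, hj3 | hj3⟩ <;>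
          (have := congrArg Prod.fst hj3; simp at this; omega)
    have hA4 : (((sr - s + 1, sc + ε * (lv - s)) : Int × Int) ∈ seen) ↔ (true = true) := by
      refine inSeenIff hseen _ _ (iff_of_true ?_ rfl)
      exact Or.inl (by simp only [relD]; rcases hε with rfl | rfl <;> omega)
    have hfA : freshNbrs seen (sr - s) (sc + ε * (lv - s)) = [(sr - s - 1, sc + ε * (lv - s))] := by
      rw [freshNbrs_eq seen _ _ true true false true hA1 hA2 hA3 hA4]
      simp
    -- after cell A
    have hseen2 : ∀ p, p ∈ (seen ++ [((sr - s - 1, sc + ε * (lv - s)) : Int × Int)]) ↔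
        ((relD sr sc p ≤ lv ∨ Extra p ∨ p = (sr, sc + ε * (lv + 1)) ∨
          p ∈ armSeg sr sc ε (lv + 1) 1 s.toNat) ∨ p = (sr - s - 1, sc + ε * (lv - s))) := by
      intro p
      rw [List.mem_append, hseen p]
      simp
    have hB1 : (((sr + s, sc + ε * (lv - s) + 1) : Int × Int) ∈
        (seen ++ [((sr - s - 1, sc + ε * (lv - s)) : Int × Int)])) ↔ (true = true) := by
      refine inSeenIff hseen2 _ _ (iff_of_true (Or.inl ?_) rfl)
      rcases hε with rfl | rfl
      · refine Or.inr (Or.inr (Or.inr ((mem_armSeg _ _ _ _ _ _ _).mpr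
          ⟨s, by omega, by omega, Or.inr ?_⟩)))
        rw [Prod.mk.injEq]
        constructor <;> omega
      · exact Or.inl (by simp only [relD]; omega)
    have hB2 : (((sr + s, sc + ε * (lv - s) - 1) : Int × Int) ∈
        (seen ++ [((sr - s - 1, sc + ε * (lv - s)) : Int × Int)])) ↔ (true = true) := by
      refine inSeenIff hseen2 _ _ (iff_of_true (Or.inl ?_) rfl)
      rcases hε with rfl | rfl
      · exact Or.inl (by simp only [relD]; omega)
      · refine Or.inr (Or.inr (Or.inr ((mem_armSeg _ _ _ _ _ _ _).mpr
          ⟨s, by omega, by omega, Or.inr ?_⟩)))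
        rw [Prod.mk.injEq]
        constructor <;> omega
    have hB3 : (((sr + s - 1, sc + ε * (lv - s)) : Int × Int) ∈
        (seen ++ [((sr - s - 1, sc + ε * (lv - s)) : Int × Int)])) ↔ (true = true) := by
      refine inSeenIff hseen2 _ _ (iff_of_true (Or.inl ?_) rfl)
      exact Or.inl (by simp only [relD]; rcases hε with rfl | rfl <;> omega)
    have hB4 : (((sr + s + 1, sc + ε * (lv - s)) : Int × Int) ∈
        (seen ++ [((sr - s - 1, sc + ε * (lv - s)) : Int × Int)])) ↔ (false = true) := by
      refine inSeenIff hseen2 _ _ (iff_of_false ?_ (by simp))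
      rintro ((h | h | h | h) | h)
      · simp only [relD] at h
        rcases hε with rfl | rfl <;> omega
      · rcases hε with rfl | rfl <;> (have := hex _ h; simp at this; omega)
      · have := congrArg Prod.fst h
        simp at this
        omega
      · rw [mem_armSeg] at h
        rcases h with ⟨j, hj1, hj2, hj3 | hj3⟩ <;>
          (have := congrArg Prod.fst hj3; simp at this; omega)
      · have := congrArg Prod.fst h
        simp at this
        omega
    have hfB : freshNbrs (seen ++ [((sr - s - 1, sc + ε * (lv - s)) : Int × Int)])
        (sr + s) (sc + ε * (lv - s)) = [(sr + s + 1, sc + ε * (lv - s))] := by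
      rw [freshNbrs_eq _ _ _ true true true false hB1 hB2 hB3 hB4]
      simp
    -- unfold the two scan steps
    have hlist : (armSeg sr sc ε lv s (m + 1)).map (fun p => (p, lv))
        = ((sr - s, sc + ε * (lv - s)), lv) :: ((sr + s, sc + ε * (lv - s)), lv) ::
          (armSeg sr sc ε lv (s + 1) m).map (fun p => (p, lv)) := by
      simp [armSeg, pairJ]
    rw [hlist, scanQ_cons, hfA, scanQ_cons, hfB]
    -- the seen set after the pair, rephrased as the longer prefix
    have hseen3 : ∀ p, p ∈ ((seen ++ [((sr - s - 1, sc + ε * (lv - s)) : Int × Int)]) ++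
        [((sr + s + 1, sc + ε * (lv - s)) : Int × Int)]) ↔
        (relD sr sc p ≤ lv ∨ Extra p ∨ p = (sr, sc + ε * (lv + 1)) ∨
          p ∈ armSeg sr sc ε (lv + 1) 1 (s + 1).toNat) := by
      intro p
      rw [List.mem_append, hseen2 p]
      have harm : p ∈ armSeg sr sc ε (lv + 1) 1 (s + 1).toNat ↔
          (p ∈ armSeg sr sc ε (lv + 1) 1 s.toNat ∨
            (p = (sr - s - 1, sc + ε * (lv - s)) ∨ p = (sr + s + 1, sc + ε * (lv - s)))) := by
        have hsn : (s + 1).toNat = s.toNat + 1 := by omega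
        rw [hsn, armSeg_snoc, List.mem_append]
        have hj : (1 : Int) + (s.toNat : Int) = s + 1 := by omega
        rw [hj]
        have hpj : pairJ sr sc ε (lv + 1) (s + 1)
            = [(sr - s - 1, sc + ε * (lv - s)), (sr + s + 1, sc + ε * (lv - s))] := by
          simp only [pairJ]
          have h1 : lv + 1 - (s + 1) = lv - s := by ring
          rw [h1]
          have h2 : sr - (s + 1) = sr - s - 1 := by ring
          have h3 : sr + (s + 1) = sr + s + 1 := by ring
          rw [h2, h3]
        rw [hpj]
        simp
      rw [harm]
      simp only [List.mem_singleton]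
      constructor
      · rintro (((h | h | h | h) | h) | h)
        · exact Or.inl h
        · exact Or.inr (Or.inl h)
        · exact Or.inr (Or.inr (Or.inl h))
        · exact Or.inr (Or.inr (Or.inr (Or.inl h)))
        · exact Or.inr (Or.inr (Or.inr (Or.inr (Or.inl h))))
        · exact Or.inr (Or.inr (Or.inr (Or.inr (Or.inr h))))
      · rintro (h | h | h | (h | h | h))
        · exact Or.inl (Or.inl (Or.inl h))
        · exact Or.inl (Or.inl (Or.inr (Or.inl h)))
        · exact Or.inl (Or.inl (Or.inr (Or.inr (Or.inl h))))
        · exact Or.inl (Or.inl (Or.inr (Or.inr (Or.inr h))))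
        · exact Or.inl (Or.inr h)
        · exact Or.inr h
    obtain ⟨ihn, ihs⟩ := ih (s + 1) _ _ (by omega) (by omega) hseen3
    refine ⟨?_, ?_⟩
    · rw [ihn]
      have hout : armSeg sr sc ε (lv + 1) (s + 1) (m + 1)
          = (sr - s - 1, sc + ε * (lv - s)) :: (sr + s + 1, sc + ε * (lv - s)) ::
            armSeg sr sc ε (lv + 1) (s + 1 + 1) m := by
        simp only [armSeg, pairJ]
        have h1 : lv + 1 - (s + 1) = lv - s := by ring
        have h2 : sr - (s + 1) = sr - s - 1 := by ring
        have h3 : sr + (s + 1) = sr + s + 1 := by ring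
        rw [h1, h2, h3]
        simp
      rw [hout]
      simp
    · intro p
      rw [ihs p]
      have : s + 1 + (m : Int) = s + ((m : Int) + 1) := by ring
      rw [this]
      have hcast : (s + ((m : Int) + 1)).toNat = (s + ((m + 1 : Nat) : Int)).toNat := by
        push_cast
        ring_nf
      rw [hcast]

-- scanning a whole level: the queue for the next level and the grown seen-ball
set_option maxHeartbeats 2000000 in
lemma scanLevel (sr sc row lv : Int) (hlv : 1 ≤ lv) (seen : PySem.Set (Int × Int)) (coords : PySem.Set Int)
    (hseen : ∀ p, p ∈ seen ↔ relD sr sc p ≤ lv) :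
    (scanQ row (lvlE sr sc lv) seen coords).1 = lvlE sr sc (lv + 1) ∧
    (∀ p, p ∈ (scanQ row (lvlE sr sc lv) seen coords).2.1 ↔ relD sr sc p ≤ lv + 1) := by
  have hstruct : lvlE sr sc lv = ((sr, sc + lv), lv) ::
      (((armSeg sr sc 1 lv 1 (lv - 1).toNat).map (fun p => (p, lv))) ++
        (((sr, sc - lv), lv) ::
          (((armSeg sr sc (-1) lv 1 (lv - 1).toNat).map (fun p => (p, lv))) ++
            [((sr - lv, sc), lv), ((sr + lv, sc), lv)]))) := by
    simp [lvlE, lvlCells]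
  -- ··· east pole ···
  have hE1 : (((sr, sc + lv + 1) : Int × Int) ∈ seen) ↔ (false = true) :=
    inSeenIff hseen _ _ (iff_of_false (by simp only [relD]; omega) (by simp))
  have hE2 : (((sr, sc + lv - 1) : Int × Int) ∈ seen) ↔ (true = true) :=
    inSeenIff hseen _ _ (iff_of_true (by simp only [relD]; omega) rfl)
  have hE3 : (((sr - 1, sc + lv) : Int × Int) ∈ seen) ↔ (false = true) :=
    inSeenIff hseen _ _ (iff_of_false (by simp only [relD]; omega) (by simp))
  have hE4 : (((sr + 1, sc + lv) : Int × Int) ∈ seen) ↔ (false = true) :=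
    inSeenIff hseen _ _ (iff_of_false (by simp only [relD]; omega) (by simp))
  have hfE : freshNbrs seen sr (sc + lv) =
      [(sr, sc + lv + 1), (sr - 1, sc + lv), (sr + 1, sc + lv)] := by
    rw [freshNbrs_eq seen _ _ false true false false hE1 hE2 hE3 hE4]
    simp
  have harm1E : armSeg sr sc 1 (lv + 1) 1 (1 : Int).toNat
      = [(sr - 1, sc + 1 * (lv + 1 - 1)), (sr + 1, sc + 1 * (lv + 1 - 1))] := by
    norm_num [armSeg, pairJ]
  have hseen1 : ∀ p, p ∈ (seen ++ [((sr, sc + lv + 1) : Int × Int), (sr - 1, sc + lv), (sr + 1, sc + lv)]) ↔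
      (relD sr sc p ≤ lv ∨ False ∨ p = (sr, sc + 1 * (lv + 1)) ∨
        p ∈ armSeg sr sc 1 (lv + 1) 1 (1 : Int).toNat) := by
    intro p
    obtain ⟨p1, p2⟩ := p
    rw [List.mem_append, hseen _, harm1E]
    simp only [List.mem_cons, List.not_mem_nil, or_false, false_or, Prod.mk.injEq, relD]
    omega
  obtain ⟨hEn, hEs⟩ := scanArm sr sc row lv 1 (Or.inl rfl) (fun _ => False) (fun p h => absurd h not_false)
    (lv - 1).toNat 1 _ (if sr = row then PySem.Set.add coords (sc + lv) else coords) (by omega) (by omega) hseen1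
  -- ··· west pole ···
  have hseen2 : ∀ p, p ∈ (scanQ row ((armSeg sr sc 1 lv 1 (lv - 1).toNat).map (fun p => (p, lv)))
      (seen ++ [((sr, sc + lv + 1) : Int × Int), (sr - 1, sc + lv), (sr + 1, sc + lv)])
      (if sr = row then PySem.Set.add coords (sc + lv) else coords)).2.1 ↔
      (relD sr sc p ≤ lv ∨ p = (sr, sc + 1 * (lv + 1)) ∨ p ∈ armSeg sr sc 1 (lv + 1) 1 lv.toNat) := by
    intro p
    rw [hEs p]
    have hc : ((1 : Int) + ((lv - 1).toNat : Int)).toNat = lv.toNat := by omega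
    rw [hc]
    tauto
  have hW1 : (((sr, sc - lv + 1) : Int × Int) ∈ (scanQ row ((armSeg sr sc 1 lv 1 (lv - 1).toNat).map (fun p => (p, lv)))
      (seen ++ [((sr, sc + lv + 1) : Int × Int), (sr - 1, sc + lv), (sr + 1, sc + lv)])
      (if sr = row then PySem.Set.add coords (sc + lv) else coords)).2.1) ↔ (true = true) :=
    inSeenIff hseen2 _ _ (iff_of_true (Or.inl (by simp only [relD]; omega)) rfl)
  have hW2 : (((sr, sc - lv - 1) : Int × Int) ∈ (scanQ row ((armSeg sr sc 1 lv 1 (lv - 1).toNat).map (fun p => (p, lv)))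
      (seen ++ [((sr, sc + lv + 1) : Int × Int), (sr - 1, sc + lv), (sr + 1, sc + lv)])
      (if sr = row then PySem.Set.add coords (sc + lv) else coords)).2.1) ↔ (false = true) := by
    refine inSeenIff hseen2 _ _ (iff_of_false ?_ (by simp))
    rintro (h | h | h)
    · simp only [relD] at h; omega
    · have := congrArg Prod.snd h; simp at this; omega
    · rw [mem_armSeg] at h
      rcases h with ⟨j, hj1, hj2, hj3 | hj3⟩ <;>
        (have := congrArg Prod.snd hj3; simp at this; omega)
  have hW3 : (((sr - 1, sc - lv) : Int × Int) ∈ (scanQ row ((armSeg sr sc 1 lv 1 (lv - 1).toNat).map (fun p => (p, lv)))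
      (seen ++ [((sr, sc + lv + 1) : Int × Int), (sr - 1, sc + lv), (sr + 1, sc + lv)])
      (if sr = row then PySem.Set.add coords (sc + lv) else coords)).2.1) ↔ (false = true) := by
    refine inSeenIff hseen2 _ _ (iff_of_false ?_ (by simp))
    rintro (h | h | h)
    · simp only [relD] at h; omega
    · have := congrArg Prod.snd h; simp at this; omega
    · rw [mem_armSeg] at h
      rcases h with ⟨j, hj1, hj2, hj3 | hj3⟩ <;>
        (have h1 := congrArg Prod.fst hj3; have h2 := congrArg Prod.snd hj3;
          simp at h1 h2; omega)
  have hW4 : (((sr + 1, sc - lv) : Int × Int) ∈ (scanQ row ((armSeg sr sc 1 lv 1 (lv - 1).toNat).map (fun p => (p, lv)))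
      (seen ++ [((sr, sc + lv + 1) : Int × Int), (sr - 1, sc + lv), (sr + 1, sc + lv)])
      (if sr = row then PySem.Set.add coords (sc + lv) else coords)).2.1) ↔ (false = true) := by
    refine inSeenIff hseen2 _ _ (iff_of_false ?_ (by simp))
    rintro (h | h | h)
    · simp only [relD] at h; omega
    · have := congrArg Prod.snd h; simp at this; omega
    · rw [mem_armSeg] at h
      rcases h with ⟨j, hj1, hj2, hj3 | hj3⟩ <;>
        (have h1 := congrArg Prod.fst hj3; have h2 := congrArg Prod.snd hj3;
          simp at h1 h2; omega)
  set SE := scanQ row ((armSeg sr sc 1 lv 1 (lv - 1).toNat).map (fun p => (p, lv)))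
      (seen ++ [((sr, sc + lv + 1) : Int × Int), (sr - 1, sc + lv), (sr + 1, sc + lv)])
      (if sr = row then PySem.Set.add coords (sc + lv) else coords) with hSE
  have hfW : freshNbrs SE.2.1 sr (sc - lv) =
      [(sr, sc - lv - 1), (sr - 1, sc - lv), (sr + 1, sc - lv)] := by
    rw [freshNbrs_eq _ _ _ true false false false hW1 hW2 hW3 hW4]
    simp
  have harm1W : armSeg sr sc (-1) (lv + 1) 1 (1 : Int).toNat
      = [(sr - 1, sc + (-1) * (lv + 1 - 1)), (sr + 1, sc + (-1) * (lv + 1 - 1))] := by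
    norm_num [armSeg, pairJ]
  have hseenW : ∀ p, p ∈ (SE.2.1 ++ [((sr, sc - lv - 1) : Int × Int), (sr - 1, sc - lv), (sr + 1, sc - lv)]) ↔
      (relD sr sc p ≤ lv ∨
        (p = (sr, sc + 1 * (lv + 1)) ∨ p ∈ armSeg sr sc 1 (lv + 1) 1 lv.toNat) ∨
        p = (sr, sc + (-1) * (lv + 1)) ∨ p ∈ armSeg sr sc (-1) (lv + 1) 1 (1 : Int).toNat) := by
    intro p
    rw [List.mem_append, hseen2 p, harm1W]
    simp only [List.mem_cons, List.not_mem_nil, or_false]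
    constructor
    · rintro ((h | h | h) | h | h | h)
      · exact Or.inl h
      · exact Or.inr (Or.inl (Or.inl h))
      · exact Or.inr (Or.inl (Or.inr h))
      · subst h
        exact Or.inr (Or.inr (Or.inl (by rw [Prod.mk.injEq]; exact ⟨rfl, by ring⟩)))
      · subst h
        exact Or.inr (Or.inr (Or.inr (Or.inl (by rw [Prod.mk.injEq]; exact ⟨rfl, by ring⟩))))
      · subst h
        exact Or.inr (Or.inr (Or.inr (Or.inr (by rw [Prod.mk.injEq]; exact ⟨rfl, by ring⟩))))
    · rintro (h | (h | h) | h | h | h)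
      · exact Or.inl (Or.inl h)
      · exact Or.inl (Or.inr (Or.inl h))
      · exact Or.inl (Or.inr (Or.inr h))
      · subst h
        exact Or.inr (Or.inl (by rw [Prod.mk.injEq]; exact ⟨rfl, by ring⟩))
      · subst h
        exact Or.inr (Or.inr (Or.inl (by rw [Prod.mk.injEq]; exact ⟨rfl, by ring⟩)))
      · subst h
        exact Or.inr (Or.inr (Or.inr (by rw [Prod.mk.injEq]; exact ⟨rfl, by ring⟩)))
  have hexW : ∀ p : Int × Int,
      (p = (sr, sc + 1 * (lv + 1)) ∨ p ∈ armSeg sr sc 1 (lv + 1) 1 lv.toNat) →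
        (-1 : Int) * (p.2 - sc) ≤ -1 := by
    rintro p (h | h)
    · subst h
      simp
      omega
    · rw [mem_armSeg] at h
      rcases h with ⟨j, hj1, hj2, hj3 | hj3⟩ <;>
        (have := congrArg Prod.snd hj3; simp at this; omega)
  obtain ⟨hWn, hWs⟩ := scanArm sr sc row lv (-1) (Or.inr rfl)
      (fun p => p = (sr, sc + 1 * (lv + 1)) ∨ p ∈ armSeg sr sc 1 (lv + 1) 1 lv.toNat) hexW
      (lv - 1).toNat 1 _
      (if sr = row then PySem.Set.add SE.2.2 (sc - lv) else SE.2.2) (by omega) (by omega) hseenW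
  set SW := scanQ row ((armSeg sr sc (-1) lv 1 (lv - 1).toNat).map (fun p => (p, lv)))
      (SE.2.1 ++ [((sr, sc - lv - 1) : Int × Int), (sr - 1, sc - lv), (sr + 1, sc - lv)])
      (if sr = row then PySem.Set.add SE.2.2 (sc - lv) else SE.2.2) with hSW
  have hseen4 : ∀ p, p ∈ SW.2.1 ↔
      (relD sr sc p ≤ lv ∨
        (p = (sr, sc + 1 * (lv + 1)) ∨ p ∈ armSeg sr sc 1 (lv + 1) 1 lv.toNat) ∨
        p = (sr, sc + (-1) * (lv + 1)) ∨ p ∈ armSeg sr sc (-1) (lv + 1) 1 lv.toNat) := by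
    intro p
    rw [hWs p]
    have hc : ((1 : Int) + (((lv - 1).toNat : Nat) : Int)).toNat = lv.toNat := by omega
    rw [hc]
  have hS1 : (((sr - lv, sc + 1) : Int × Int) ∈ SW.2.1) ↔ (true = true) := by
    refine inSeenIff hseen4 _ _ (iff_of_true ?_ rfl)
    refine Or.inr (Or.inl (Or.inr ((mem_armSeg _ _ _ _ _ _ _).mpr
      ⟨lv, by omega, by omega, Or.inl ?_⟩)))
    rw [Prod.mk.injEq]
    exact ⟨rfl, by ring⟩
  have hS2 : (((sr - lv, sc - 1) : Int × Int) ∈ SW.2.1) ↔ (true = true) := by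
    refine inSeenIff hseen4 _ _ (iff_of_true ?_ rfl)
    refine Or.inr (Or.inr (Or.inr ((mem_armSeg _ _ _ _ _ _ _).mpr
      ⟨lv, by omega, by omega, Or.inl ?_⟩)))
    rw [Prod.mk.injEq]
    exact ⟨rfl, by ring⟩
  have hS3 : (((sr - lv - 1, sc) : Int × Int) ∈ SW.2.1) ↔ (false = true) := by
    refine inSeenIff hseen4 _ _ (iff_of_false ?_ (by simp))
    rintro (h | (h | h) | h | h)
    · simp only [relD] at h; omega
    · have := congrArg Prod.fst h; simp at this; omega
    · rw [mem_armSeg] at h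
      rcases h with ⟨j, hj1, hj2, hj3 | hj3⟩ <;>
        (have := congrArg Prod.snd hj3; simp at this; omega)
    · have := congrArg Prod.fst h; simp at this; omega
    · rw [mem_armSeg] at h
      rcases h with ⟨j, hj1, hj2, hj3 | hj3⟩ <;>
        (have := congrArg Prod.snd hj3; simp at this; omega)
  have hS4 : (((sr - lv + 1, sc) : Int × Int) ∈ SW.2.1) ↔ (true = true) :=
    inSeenIff hseen4 _ _ (iff_of_true (Or.inl (by simp only [relD]; omega)) rfl)
  have hfS : freshNbrs SW.2.1 (sr - lv) sc = [(sr - lv - 1, sc)] := by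
    rw [freshNbrs_eq _ _ _ true true false true hS1 hS2 hS3 hS4]
    simp
  have hseen5 : ∀ p, p ∈ (SW.2.1 ++ [((sr - lv - 1, sc) : Int × Int)]) ↔
      ((relD sr sc p ≤ lv ∨
        (p = (sr, sc + 1 * (lv + 1)) ∨ p ∈ armSeg sr sc 1 (lv + 1) 1 lv.toNat) ∨
        p = (sr, sc + (-1) * (lv + 1)) ∨ p ∈ armSeg sr sc (-1) (lv + 1) 1 lv.toNat) ∨
        p = (sr - lv - 1, sc)) := by
    intro p
    rw [List.mem_append, hseen4 p, List.mem_singleton]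
  have hN1 : (((sr + lv, sc + 1) : Int × Int) ∈ (SW.2.1 ++ [((sr - lv - 1, sc) : Int × Int)])) ↔ (true = true) := by
    refine inSeenIff hseen5 _ _ (iff_of_true (Or.inl ?_) rfl)
    refine Or.inr (Or.inl (Or.inr ((mem_armSeg _ _ _ _ _ _ _).mpr
      ⟨lv, by omega, by omega, Or.inr ?_⟩)))
    rw [Prod.mk.injEq]
    exact ⟨rfl, by ring⟩
  have hN2 : (((sr + lv, sc - 1) : Int × Int) ∈ (SW.2.1 ++ [((sr - lv - 1, sc) : Int × Int)])) ↔ (true = true) := by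
    refine inSeenIff hseen5 _ _ (iff_of_true (Or.inl ?_) rfl)
    refine Or.inr (Or.inr (Or.inr ((mem_armSeg _ _ _ _ _ _ _).mpr
      ⟨lv, by omega, by omega, Or.inr ?_⟩)))
    rw [Prod.mk.injEq]
    exact ⟨rfl, by ring⟩
  have hN3 : (((sr + lv - 1, sc) : Int × Int) ∈ (SW.2.1 ++ [((sr - lv - 1, sc) : Int × Int)])) ↔ (true = true) :=
    inSeenIff hseen5 _ _ (iff_of_true (Or.inl (Or.inl (by simp only [relD]; omega))) rfl)
  have hN4 : (((sr + lv + 1, sc) : Int × Int) ∈ (SW.2.1 ++ [((sr - lv - 1, sc) : Int × Int)])) ↔ (false = true) := by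
    refine inSeenIff hseen5 _ _ (iff_of_false ?_ (by simp))
    rintro ((h | (h | h) | h | h) | h)
    · simp only [relD] at h; omega
    · have := congrArg Prod.fst h; simp at this; omega
    · rw [mem_armSeg] at h
      rcases h with ⟨j, hj1, hj2, hj3 | hj3⟩ <;>
        (have := congrArg Prod.snd hj3; simp at this; omega)
    · have := congrArg Prod.fst h; simp at this; omega
    · rw [mem_armSeg] at h
      rcases h with ⟨j, hj1, hj2, hj3 | hj3⟩ <;>
        (have := congrArg Prod.snd hj3; simp at this; omega)
    · have := congrArg Prod.fst h; simp at this; omega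
  have hfN : freshNbrs (SW.2.1 ++ [((sr - lv - 1, sc) : Int × Int)]) (sr + lv) sc
      = [(sr + lv + 1, sc)] := by
    rw [freshNbrs_eq _ _ _ true true true false hN1 hN2 hN3 hN4]
    simp
  -- the grown seen set is exactly the ball of radius lv + 1
  have hsphere : ∀ p, p ∈ ((SW.2.1 ++ [((sr - lv - 1, sc) : Int × Int)]) ++ [((sr + lv + 1, sc) : Int × Int)]) ↔
      relD sr sc p ≤ lv + 1 := by
    intro p
    rw [List.mem_append, hseen5 p, List.mem_singleton]
    constructor
    · rintro (((h | (h | h) | h | h) | h) | h)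
      · simp only [relD] at h ⊢; omega
      · subst h; simp only [relD]; omega
      · rw [mem_armSeg] at h
        rcases h with ⟨j, hj1, hj2, hj3 | hj3⟩ <;>
          (subst hj3; simp only [relD]; omega)
      · subst h; simp only [relD]; omega
      · rw [mem_armSeg] at h
        rcases h with ⟨j, hj1, hj2, hj3 | hj3⟩ <;>
          (subst hj3; simp only [relD]; omega)
      · subst h; simp only [relD]; omega
      · subst h; simp only [relD]; omega
    · intro h
      obtain ⟨p1, p2⟩ := p
      simp only [relD] at h
      by_cases hb : relD sr sc (p1, p2) ≤ lv
      · exact Or.inl (Or.inl (Or.inl hb))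
      simp only [relD] at hb
      by_cases hc0 : p2 = sc
      · subst hc0
        rcases (by omega : p1 = sr - lv - 1 ∨ p1 = sr + lv + 1) with h1 | h1
        · subst h1; exact Or.inl (Or.inr rfl)
        · subst h1; exact Or.inr rfl
      · by_cases hcp : sc < p2
        · by_cases hr0 : p1 = sr
          · subst hr0
            refine Or.inl (Or.inl (Or.inr (Or.inl (Or.inl ?_))))
            rw [Prod.mk.injEq]
            exact ⟨rfl, by omega⟩
          · refine Or.inl (Or.inl (Or.inr (Or.inl (Or.inr
              ((mem_armSeg _ _ _ _ _ _ _).mpr ?_)))))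
            by_cases hrl : p1 < sr
            · refine ⟨sr - p1, by omega, by omega, Or.inl ?_⟩
              rw [Prod.mk.injEq]
              constructor <;> omega
            · refine ⟨p1 - sr, by omega, by omega, Or.inr ?_⟩
              rw [Prod.mk.injEq]
              constructor <;> omega
        · by_cases hr0 : p1 = sr
          · subst hr0
            refine Or.inl (Or.inl (Or.inr (Or.inr (Or.inl ?_))))
            rw [Prod.mk.injEq]
            exact ⟨rfl, by omega⟩
          · refine Or.inl (Or.inl (Or.inr (Or.inr (Or.inr
              ((mem_armSeg _ _ _ _ _ _ _).mpr ?_)))))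
            by_cases hrl : p1 < sr
            · refine ⟨sr - p1, by omega, by omega, Or.inl ?_⟩
              rw [Prod.mk.injEq]
              constructor <;> omega
            · refine ⟨p1 - sr, by omega, by omega, Or.inr ?_⟩
              rw [Prod.mk.injEq]
              constructor <;> omega
  -- assemble the whole level
  have hq : scanQ row (lvlE sr sc lv) seen coords =
      (((sr, sc + lv + 1), lv + 1) :: ((sr - 1, sc + lv), lv + 1) :: ((sr + 1, sc + lv), lv + 1) ::
        ((armSeg sr sc 1 (lv + 1) (1 + 1) (lv - 1).toNat).map (fun p => (p, lv + 1)) ++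
          (((sr, sc - lv - 1), lv + 1) :: ((sr - 1, sc - lv), lv + 1) :: ((sr + 1, sc - lv), lv + 1) ::
            ((armSeg sr sc (-1) (lv + 1) (1 + 1) (lv - 1).toNat).map (fun p => (p, lv + 1)) ++
              (((sr - lv - 1, sc), lv + 1) :: (((sr + lv + 1, sc), lv + 1) :: []))))),
        ((SW.2.1 ++ [((sr - lv - 1, sc) : Int × Int)]) ++ [((sr + lv + 1, sc) : Int × Int)]),
        (if sr + lv = row then
            PySem.Set.add (if sr - lv = row then PySem.Set.add SW.2.2 sc else SW.2.2) sc
          else (if sr - lv = row then PySem.Set.add SW.2.2 sc else SW.2.2))) := by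
    rw [hstruct, scanQ_cons, hfE, scanQ_append]
    rw [← hSE, hEn]
    rw [scanQ_cons, hfW, scanQ_append, ← hSW, hWn]
    rw [scanQ_cons, hfS, scanQ_cons, hfN]
    simp only [scanQ, List.map_cons, List.map_nil, List.append_assoc, List.cons_append,
      List.nil_append, List.append_nil]
  rw [hq]
  refine ⟨?_, hsphere⟩
  -- the emitted queue is the next level in order
  have hlvl : lvlE sr sc (lv + 1) =
      ((sr, sc + (lv + 1)), lv + 1) ::
        (((pairJ sr sc 1 (lv + 1) 1 ++ armSeg sr sc 1 (lv + 1) (1 + 1) (lv - 1).toNat).map (fun p => (p, lv + 1))) ++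
          (((sr, sc - (lv + 1)), lv + 1) ::
            (((pairJ sr sc (-1) (lv + 1) 1 ++ armSeg sr sc (-1) (lv + 1) (1 + 1) (lv - 1).toNat).map (fun p => (p, lv + 1))) ++
              [((sr - (lv + 1), sc), lv + 1), ((sr + (lv + 1), sc), lv + 1)]))) := by
    have hcnt : (lv + 1 - 1).toNat = (lv - 1).toNat + 1 := by omega
    rw [lvlE, lvlCells, hcnt, armSeg, armSeg]
    simp [List.append_assoc]
  rw [hlvl]
  simp only [pairJ, List.map_append, List.map_cons, List.map_nil, List.cons_append,
    List.nil_append, List.append_assoc]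
  have e1 : sc + (lv + 1) = sc + lv + 1 := by ring
  have e2 : sc + 1 * (lv + 1 - 1) = sc + lv := by ring
  have e3 : sc + (-1) * (lv + 1 - 1) = sc - lv := by ring
  have e4 : sc - (lv + 1) = sc - lv - 1 := by ring
  have e5 : sr - (lv + 1) = sr - lv - 1 := by ring
  have e6 : sr + (lv + 1) = sr + lv + 1 := by ring
  rw [e1, e2, e3, e4, e5, e6]

lemma filter_armSeg (sr sc row ε lv : Int) :
    ∀ (m : Nat) (s : Int), 1 ≤ s →
      (((armSeg sr sc ε lv s m).filter (fun p => decide (p.1 = row))).map Prod.snd) =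
        if s ≤ ((sr - row).natAbs : Int) ∧ ((sr - row).natAbs : Int) < s + m
        then [sc + ε * (lv - ((sr - row).natAbs : Int))] else [] := by
  intro m
  induction m with
  | zero =>
    intro s _
    rw [if_neg (by omega)]
    simp [armSeg]
  | succ m ih =>
    intro s hs
    by_cases h1 : sr - s = row
    · have ht : ((sr - row).natAbs : Int) = s := by omega
      have h2 : ¬ (sr + s = row) := by omega
      rw [armSeg, List.filter_append, List.map_append, ih (s + 1) (by omega)]
      rw [if_neg (by omega), if_pos (by omega)]
      simp [pairJ, List.filter_cons, h1, h2, ht]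
    · by_cases h2 : sr + s = row
      · have ht : ((sr - row).natAbs : Int) = s := by omega
        rw [armSeg, List.filter_append, List.map_append, ih (s + 1) (by omega)]
        rw [if_neg (by omega), if_pos (by omega)]
        simp [pairJ, List.filter_cons, h1, h2, ht]
      · have ht : ((sr - row).natAbs : Int) ≠ s := by omega
        rw [armSeg, List.filter_append, List.map_append, ih (s + 1) (by omega)]
        have d1 : (decide (sr - s = row)) = false := by simp [h1]
        have d2 : (decide (sr + s = row)) = false := by simp [h2]
        simp only [pairJ, List.filter_cons, d1, d2, Bool.false_eq_true, if_false,
          List.filter_nil, List.map_nil, List.nil_append]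
        by_cases hc : s + 1 ≤ ((sr - row).natAbs : Int) ∧ ((sr - row).natAbs : Int) < s + 1 + m
        · rw [if_pos hc, if_pos (by omega)]
        · rw [if_neg hc, if_neg (by omega)]

lemma rowCols_level (sr sc row lv : Int) (hlv : 1 ≤ lv) :
    ((((lvlE sr sc lv).map Prod.fst).filter (fun p => decide (p.1 = row))).map Prod.snd)
      = rowColsClosed sr sc row lv := by
  have hmap : (lvlE sr sc lv).map Prod.fst = lvlCells sr sc lv := by
    unfold lvlE
    rw [List.map_map, show (Prod.fst ∘ fun p : Int × Int => (p, lv)) = id from rfl, List.map_id]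
  rw [hmap]
  have harmE := filter_armSeg sr sc row 1 lv ((lv - 1).toNat) 1 (by omega)
  have harmW := filter_armSeg sr sc row (-1) lv ((lv - 1).toNat) 1 (by omega)
  have hcast : (1 : Int) + (((lv - 1).toNat : Nat) : Int) = lv := by omega
  rw [hcast] at harmE harmW
  by_cases h0 : sr = row
  · have hd0 : decide (sr = row) = true := by simp [h0]
    have h1 : decide (sr - lv = row) = false := by simp; omega
    have h2 : decide (sr + lv = row) = false := by simp; omega
    have ht : ((sr - row).natAbs : Int) = 0 := by omega
    simp only [lvlCells, List.filter_append, List.filter_cons, List.filter_nil, hd0, h1, h2,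
      Bool.false_eq_true, if_false, if_true, List.map_append, List.map_cons, List.map_nil,
      harmE, harmW]
    rw [if_neg (by omega), if_neg (by omega)]
    simp only [rowColsClosed, ht]
    rw [if_neg (by omega), if_neg (by omega)]
    simp
  · have hd0 : decide (sr = row) = false := by simp [h0]
    simp only [lvlCells, List.filter_append, List.filter_cons, List.filter_nil, hd0,
      Bool.false_eq_true, if_false, List.map_append, List.map_cons, List.map_nil, harmE, harmW]
    by_cases hlt : ((sr - row).natAbs : Int) < lv
    · have h1 : decide (sr - lv = row) = false := by simp; omega
      have h2 : decide (sr + lv = row) = false := by simp; omega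
      simp only [h1, h2, Bool.false_eq_true, if_false, List.map_nil]
      rw [if_pos (by omega), if_pos (by omega)]
      simp only [rowColsClosed]
      rw [if_neg (by omega), if_neg (by omega)]
      simp
      omega
    · by_cases heq : ((sr - row).natAbs : Int) = lv
      · rw [if_neg (by omega), if_neg (by omega)]
        rcases (by omega : sr - lv = row ∨ sr + lv = row) with h1 | h1
        · have hd1 : decide (sr - lv = row) = true := by simp [h1]
          have hd2 : decide (sr + lv = row) = false := by simp; omega
          simp only [hd1, hd2, Bool.false_eq_true, if_false, if_true, List.map_cons, List.map_nil]
          simp only [rowColsClosed]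
          rw [if_neg (by omega), if_pos heq]
          simp
        · have hd1 : decide (sr - lv = row) = false := by simp; omega
          have hd2 : decide (sr + lv = row) = true := by simp [h1]
          simp only [hd1, hd2, Bool.false_eq_true, if_false, if_true, List.map_cons, List.map_nil]
          simp only [rowColsClosed]
          rw [if_neg (by omega), if_pos heq]
          simp
      · rw [if_neg (by omega), if_neg (by omega)]
        have hd1 : decide (sr - lv = row) = false := by simp; omega
        have hd2 : decide (sr + lv = row) = false := by simp; omega
        simp only [hd1, hd2, Bool.false_eq_true, if_false, List.map_nil]
        simp only [rowColsClosed]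
        rw [if_pos (by omega)]
        simp

lemma foldl_add_fresh (cols : List Int) :
    ∀ (coords : PySem.Set Int), cols.Nodup → (∀ x ∈ cols, x ∉ coords) →
      cols.foldl PySem.Set.add coords = coords ++ cols := by
  induction cols with
  | nil => intro coords _ _; simp
  | cons x cols ih =>
    intro coords hnd hf
    have hx : x ∉ coords := hf x (List.mem_cons_self ..)
    rw [List.foldl_cons, PySem.Set.add_of_not_mem hx,
      ih _ (by simp_all) (by
        intro y hy
        simp only [List.mem_append, List.mem_singleton]
        rintro (h | rfl)
        · exact hf y (List.mem_cons_of_mem _ hy) h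
        · simp_all)]
    simp [List.append_assoc]

lemma length_lvlE (sr sc lv : Int) (hlv : 1 ≤ lv) : (lvlE sr sc lv).length = (4 * lv).toNat := by
  simp [lvlE, lvlCells, length_armSeg]
  omega

lemma pops_eq (m : Nat) : ∀ lv : Int, 1 ≤ lv →
    (pops m lv : Int) = 4 * m * lv + 2 * m * (m - 1) + 1 := by
  induction m with
  | zero => intro lv _; simp [pops]
  | succ m ih =>
    intro lv hlv
    have h4 : ((4 * lv).toNat : Int) = 4 * lv := Int.toNat_of_nonneg (by omega)
    simp only [pops]
    push_cast [h4, ih (lv + 1) (by omega)]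
    ring

lemma mainLoop (sr sc row distance : Int) :
    ∀ (m : Nat) (lv : Int) (fuel : Nat) (seen : PySem.Set (Int × Int)) (coords : PySem.Set Int),
      1 ≤ lv → lv + m = distance + 1 →
      (∀ p, p ∈ seen ↔ relD sr sc p ≤ lv) →
      (∀ x ∈ coords, ((x - sc).natAbs : Int) + ((sr - row).natAbs : Int) < lv) →
      pops m lv ≤ fuel →
      cantRowLoop distance row fuel (lvlE sr sc lv) coords seen = coords ++ colsFrom sr sc row lv m := by
  intro m
  induction m with
  | zero =>
    intro lv fuel seen coords hlv hm hseen hcoords hfuel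
    obtain ⟨f, rfl⟩ : ∃ f, fuel = f + 1 := ⟨fuel - 1, by simp [pops] at hfuel; omega⟩
    have htl : lvlE sr sc lv = ((sr, sc + lv), lv) ::
        (((armSeg sr sc 1 lv 1 (lv - 1).toNat).map (fun p => (p, lv))) ++
          (((sr, sc - lv), lv) ::
            (((armSeg sr sc (-1) lv 1 (lv - 1).toNat).map (fun p => (p, lv))) ++
              [((sr - lv, sc), lv), ((sr + lv, sc), lv)]))) := by
      simp [lvlE, lvlCells]
    rw [htl, loop_break distance row f _ _ _ _ _ (by push_cast at hm; omega)]
    simp [colsFrom]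
  | succ m ih =>
    intro lv fuel seen coords hlv hm hseen hcoords hfuel
    have hlen : (lvlE sr sc lv).length = (4 * lv).toNat := length_lvlE sr sc lv hlv
    have hfuel' : pops m (lv + 1) ≤ fuel - (lvlE sr sc lv).length := by
      simp only [pops] at hfuel
      omega
    have hdists : ∀ e ∈ lvlE sr sc lv, e.2 ≤ distance := by
      intro e he
      simp only [lvlE, List.mem_map] at he
      obtain ⟨p, -, rfl⟩ := he
      push_cast at hm
      omega
    have hfe : fuel = (lvlE sr sc lv).length + (fuel - (lvlE sr sc lv).length) := by
      simp only [pops] at hfuel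
      omega
    have hrun := loop_run distance row (lvlE sr sc lv) [] coords seen
      (fuel - (lvlE sr sc lv).length) hdists
    rw [List.append_nil] at hrun
    rw [hfe, hrun]
    rw [List.nil_append]
    obtain ⟨hn, hs⟩ := scanLevel sr sc row lv hlv seen coords hseen
    have hrc : rowColsClosed sr sc row lv = [] ∨
        (rowColsClosed sr sc row lv).Nodup ∧
          (∀ x ∈ rowColsClosed sr sc row lv,
            ((x - sc).natAbs : Int) + ((sr - row).natAbs : Int) = lv) := by
      simp only [rowColsClosed]
      by_cases h1 : lv < ((sr - row).natAbs : Int)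
      · exact Or.inl (by rw [if_pos h1])
      · rw [if_neg h1]
        by_cases h2 : ((sr - row).natAbs : Int) = lv
        · rw [if_pos h2]
          refine Or.inr ⟨by simp, ?_⟩
          intro x hx
          rw [List.mem_singleton] at hx
          subst hx
          omega
        · rw [if_neg h2]
          refine Or.inr ⟨by
            simp only [List.nodup_cons, List.mem_singleton, List.not_mem_nil,
              not_false_iff, List.nodup_nil, and_true]
            omega, ?_⟩
          intro x hx
          simp only [List.mem_cons, List.mem_singleton, List.not_mem_nil, or_false] at hx
          rcases hx with rfl | rfl <;> omega
    have hcc : (scanQ row (lvlE sr sc lv) seen coords).2.2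
        = coords ++ rowColsClosed sr sc row lv := by
      rw [scanQ_coords, rowCols_level sr sc row lv hlv]
      rcases hrc with h | ⟨hnd, hval⟩
      · rw [h]
        simp
      · exact foldl_add_fresh _ _ hnd (fun x hx hmem => by
          have := hcoords x hmem
          have := hval x hx
          omega)
    rw [hn, hcc]
    have hcoords' : ∀ x ∈ coords ++ rowColsClosed sr sc row lv,
        ((x - sc).natAbs : Int) + ((sr - row).natAbs : Int) < lv + 1 := by
      intro x hx
      rcases List.mem_append.mp hx with h | h
      · have := hcoords x h
        omega
      · rcases hrc with hemp | ⟨-, hval⟩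
        · rw [hemp] at h
          simp at h
        · have := hval x h
          omega
    rw [ih (lv + 1) (fuel - (lvlE sr sc lv).length) _ _ (by omega) (by push_cast at hm ⊢; omega)
      hs hcoords' hfuel']
    rw [colsFrom, List.append_assoc]

lemma colsFrom_split (sr sc row : Int) (a : Nat) :
    ∀ (b : Nat) (lv : Int), colsFrom sr sc row lv (a + b) =
      colsFrom sr sc row lv a ++ colsFrom sr sc row (lv + a) b := by
  induction a with
  | zero => intro b lv; simp [colsFrom]
  | succ a ih =>
    intro b lv
    have h : a + 1 + b = (a + b) + 1 := by omega
    rw [h, colsFrom, colsFrom, ih, List.append_assoc]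
    have h2 : lv + 1 + (a : Int) = lv + (a + 1 : Nat) := by push_cast; ring
    rw [h2]

lemma colsFrom_nil (sr sc row : Int) :
    ∀ (m : Nat) (lv : Int), lv + m ≤ ((sr - row).natAbs : Int) →
      colsFrom sr sc row lv m = [] := by
  intro m
  induction m with
  | zero => intro lv _; simp [colsFrom]
  | succ m ih =>
    intro lv h
    rw [colsFrom, ih (lv + 1) (by omega)]
    simp only [rowColsClosed, List.append_nil]
    have hc : lv < ((sr - row).natAbs : Int) := by omega
    rw [if_pos hc]

lemma colsFrom_pairs (sr sc row : Int) :
    ∀ (m : Nat) (lv : Int), ((sr - row).natAbs : Int) < lv →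
      colsFrom sr sc row lv m = pairsSeg sc (lv - ((sr - row).natAbs : Int)) m := by
  intro m
  induction m with
  | zero => intro lv _; simp [colsFrom, pairsSeg]
  | succ m ih =>
    intro lv h
    rw [colsFrom, ih (lv + 1) (by omega), pairsSeg]
    simp only [rowColsClosed]
    rw [if_neg (by omega), if_neg (by omega)]
    have h2 : lv + 1 - ((sr - row).natAbs : Int) = lv - ((sr - row).natAbs : Int) + 1 := by omega
    rw [h2]

lemma colsFrom_total (sr sc row d : Int) (hd : 0 ≤ d) :
    colsFrom sr sc row 0 (d.toNat + 1) = midForm sc (d - ((sr - row).natAbs : Int)) := by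
  by_cases ht : ((sr - row).natAbs : Int) ≤ d
  · have ha : d.toNat + 1 = ((sr - row).natAbs + ((d - ((sr - row).natAbs : Int)).toNat + 1)) := by
      omega
    rw [ha, colsFrom_split, colsFrom_nil sr sc row (sr - row).natAbs 0 (by omega)]
    have h0 : ((0 : Int) + (((sr - row).natAbs : Nat) : Int)) = ((sr - row).natAbs : Int) := by
      omega
    rw [h0, colsFrom, colsFrom_pairs sr sc row _ _ (by omega)]
    have hrc : rowColsClosed sr sc row ((sr - row).natAbs : Int) = [sc] := by
      simp only [rowColsClosed]
      rw [if_neg (by omega)]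
      simp
    have hm : midForm sc (d - ((sr - row).natAbs : Int))
        = sc :: pairsSeg sc 1 (d - ((sr - row).natAbs : Int)).toNat := by
      simp only [midForm]
      rw [if_neg (by omega)]
    have h2 : ((sr - row).natAbs : Int) + 1 - ((sr - row).natAbs : Int) = 1 := by omega
    rw [hrc, hm, h2]
    simp
  · rw [colsFrom_nil sr sc row (d.toNat + 1) 0 (by omega)]
    have hm : midForm sc (d - ((sr - row).natAbs : Int)) = [] := by
      simp only [midForm]
      rw [if_pos (by omega)]
    rw [hm]

lemma altFold (sc : Int) : ∀ n : Nat,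
    (List.range n).foldl
      (fun s (k : Nat) => PySem.Set.add (PySem.Set.add s (sc + (1 + (k : Int)))) (sc - (1 + (k : Int))))
      [sc] = sc :: pairsSeg sc 1 n := by
  intro n
  induction n with
  | zero => simp [pairsSeg]
  | succ n ih =>
    rw [List.range_succ, List.foldl_append, ih, List.foldl_cons, List.foldl_nil]
    have hm1 : (sc + (1 + (n : Int))) ∉ (sc :: pairsSeg sc 1 n) := by
      rw [List.mem_cons, not_or, mem_pairsSeg]
      refine ⟨by omega, ?_⟩
      rintro ⟨j, hj1, hj2, hj3 | hj3⟩ <;> omega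
    rw [PySem.Set.add_of_not_mem hm1]
    have hm2 : (sc - (1 + (n : Int))) ∉ ((sc :: pairsSeg sc 1 n) ++ [sc + (1 + (n : Int))]) := by
      rw [List.mem_append, not_or, List.mem_cons, not_or, mem_pairsSeg]
      refine ⟨⟨by omega, ?_⟩, by simp; omega⟩
      rintro ⟨j, hj1, hj2, hj3 | hj3⟩ <;> omega
    rw [PySem.Set.add_of_not_mem hm2]
    have hp := pairsSeg_snoc sc 1 n
    have h1 : (1 : Int) + (n : Int) = 1 + n := rfl
    rw [hp]
    simp [List.append_assoc]

lemma alt_eq_mid (distance : Int) (sensor : Int × Int) (row : Int) :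
    cant_row_alt distance sensor row =
      midForm sensor.2 (distance - ((sensor.1 - row).natAbs : Int)) := by
  obtain ⟨sr, sc⟩ := sensor
  simp only [cant_row_alt]
  have habs : |sr - row| = ((sr - row).natAbs : Int) := Int.abs_eq_natAbs _
  rw [habs]
  by_cases hrem : 0 ≤ distance - ((sr - row).natAbs : Int)
  · rw [if_pos hrem]
    rw [PySem.List.pyRange_one]
    have hempty : PySem.Set.add (PySem.Set.empty : PySem.Set Int) sc = [sc] := rfl
    rw [hempty, List.foldl_map]
    have hn : (distance - ((sr - row).natAbs : Int) + 1 - 1).toNat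
        = (distance - ((sr - row).natAbs : Int)).toNat := by omega
    rw [hn, altFold]
    simp only [midForm]
    rw [if_neg (by omega)]
  · rw [if_neg hrem]
    simp only [midForm]
    rw [if_pos (by omega)]
    rfl

lemma cant_row_eq_mid (distance sr sc row : Int) :
    cant_row distance (sr, sc) row = midForm sc (distance - ((sr - row).natAbs : Int)) := by
  unfold cant_row
  by_cases hd : distance < 0
  · have h1 : 1 ≤ 2 * distance * distance + 2 * distance + 3 := by
      nlinarith [sq_nonneg (distance + 1)]
    have hf : (2 * distance * distance + 2 * distance + 3).toNat
        = (2 * distance * distance + 2 * distance + 2).toNat + 1 := by omega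
    rw [hf, loop_break distance row _ _ _ _ _ _ (by omega)]
    have hm : midForm sc (distance - ((sr - row).natAbs : Int)) = [] := by
      simp only [midForm]
      rw [if_pos (by omega)]
    rw [hm]
    rfl
  · push_neg at hd
    have h3 : 3 ≤ 2 * distance * distance + 2 * distance + 3 := by
      nlinarith [mul_nonneg hd hd]
    have hse : PySem.Set.add PySem.Set.empty ((sr, sc) : Int × Int) = [((sr, sc) : Int × Int)] := rfl
    have hin : ∀ a b : Int, ¬ (a = sr ∧ b = sc) →
        ((((a, b) : Int × Int) ∈ ([((sr, sc) : Int × Int)] : PySem.Set (Int × Int))) ↔ (false = true)) := by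
      intro a b hab
      simp only [List.mem_singleton, Prod.mk.injEq]
      constructor
      · intro h; exact absurd h hab
      · simp
    have hf0 : freshNbrs [((sr, sc) : Int × Int)] sr sc
        = [(sr, sc + 1), (sr, sc - 1), (sr - 1, sc), (sr + 1, sc)] := by
      rw [freshNbrs_eq _ _ _ false false false false
        (hin _ _ (by rintro ⟨-, h⟩; omega)) (hin _ _ (by rintro ⟨-, h⟩; omega))
        (hin _ _ (by rintro ⟨h, -⟩; omega)) (hin _ _ (by rintro ⟨h, -⟩; omega))]
      simp
    have hdists : ∀ e ∈ [((((sr, sc) : Int × Int), 0) : (Int × Int) × Int)], e.2 ≤ distance := by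
      intro e he
      rw [List.mem_singleton] at he
      subst he
      exact hd
    have hrun := loop_run distance row [((((sr, sc) : Int × Int), 0) : (Int × Int) × Int)] []
      PySem.Set.empty [((sr, sc) : Int × Int)]
      ((2 * distance * distance + 2 * distance + 3).toNat - 1) hdists
    rw [List.append_nil] at hrun
    have hfe : (2 * distance * distance + 2 * distance + 3).toNat
        = [((((sr, sc) : Int × Int), 0) : (Int × Int) × Int)].length
          + ((2 * distance * distance + 2 * distance + 3).toNat - 1) := by
      simp only [List.length_singleton]
      omega
    rw [hse, hfe, hrun, List.nil_append, scanQ_single, hf0]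
    have hadd : PySem.Set.add (PySem.Set.empty : PySem.Set Int) sc = [sc] := rfl
    rw [hadd]
    have hlvl1 : ([((sr, sc + 1) : Int × Int), (sr, sc - 1), (sr - 1, sc), (sr + 1, sc)]).map
        (fun p => (p, (0 : Int) + 1)) = lvlE sr sc 1 := by
      norm_num [lvlE, lvlCells, armSeg]
    rw [hlvl1]
    change cantRowLoop distance row ((2 * distance * distance + 2 * distance + 3).toNat - 1)
      (lvlE sr sc 1) (if sr = row then ([sc] : PySem.Set Int) else ([] : PySem.Set Int))
      ([((sr, sc) : Int × Int)] ++ [((sr, sc + 1) : Int × Int), (sr, sc - 1), (sr - 1, sc), (sr + 1, sc)])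
      = midForm sc (distance - ((sr - row).natAbs : Int))
    have hseen1 : ∀ p : Int × Int,
        p ∈ ([((sr, sc) : Int × Int)] ++ [((sr, sc + 1) : Int × Int), (sr, sc - 1), (sr - 1, sc), (sr + 1, sc)]) ↔
          relD sr sc p ≤ 1 := by
      intro p
      obtain ⟨p1, p2⟩ := p
      simp only [List.mem_append, List.mem_cons, List.mem_singleton, List.not_mem_nil,
        or_false, Prod.mk.injEq, relD]
      omega
    have hcoords1 : ∀ x ∈ (if sr = row then ([sc] : PySem.Set Int) else ([] : PySem.Set Int)),
        ((x - sc).natAbs : Int) + ((sr - row).natAbs : Int) < 1 := by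
      intro x hx
      by_cases hr : sr = row
      · rw [if_pos hr, List.mem_singleton] at hx
        subst hx
        omega
      · rw [if_neg hr] at hx
        exact absurd hx (List.not_mem_nil)
    have hp : (pops distance.toNat 1 : Int) = 2 * distance * distance + 2 * distance + 1 := by
      rw [pops_eq distance.toNat 1 (by omega)]
      push_cast [Int.toNat_of_nonneg hd]
      ring
    have hfuel1 : pops distance.toNat 1
        ≤ (2 * distance * distance + 2 * distance + 3).toNat - 1 := by
      have h2 : (2 * distance * distance + 2 * distance + 3 : Int)
          = (2 * distance * distance + 2 * distance + 1) + 2 := by ring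
      omega
    rw [mainLoop sr sc row distance distance.toNat 1
      ((2 * distance * distance + 2 * distance + 3).toNat - 1) _ _ (by omega)
      (by push_cast; omega) hseen1 hcoords1 hfuel1]
    have htot := colsFrom_total sr sc row distance hd
    rw [colsFrom] at htot
    have hc0 : rowColsClosed sr sc row 0 = (if sr = row then ([sc] : List Int) else []) := by
      simp only [rowColsClosed]
      by_cases hr : sr = row
      · rw [if_pos hr, if_neg (by omega), if_pos (by omega)]
      · rw [if_neg hr, if_pos (by omega)]
    rw [hc0] at htot
    have h01 : (0 : Int) + 1 = 1 := by norm_num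
    rw [h01] at htot
    exact htot

-- ===== VERDICT (by name: the statement is the Claim_ definition above) =====
theorem cant_row_spec : Claim_equal_cant_row := by
  intro distance sensor row _
  unfold Spec_cant_row
  obtain ⟨sr, sc⟩ := sensor
  rw [alt_eq_mid]
  exact cant_row_eq_mid distance sr sc row
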